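-- pv_equiv track=rewrite | github.com/LoisBN/python | env/TME.py | nb_couples_intervalle
-- ===== SOURCE A (Python) =====
-- def nb_couples_intervalle(n,p):
--     """int+int->int\n
--     hypothèse : n<=p\n
--     retourne le nombre de couples d'entier (i,j) appartenant à l'intervalle [n,p]"""
--     compteur = 0
--     i=n
--     j=p
--     while (i<j):
--         while True:
--             if j == i+1:
--                 j = p
--                 break
--             compteur = compteur + 1
--             j = j-1
--         compteur = compteur + 1
--         i = i+1
--     return compteur
-- ===== SOURCE B (Python) =====
-- def nb_couples_intervalle(n, p):
--     """Closed form: the number of counted pairs is (p-n)(p-n+1)/2, 0 when p<=n."""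
--     d = p - n
--     if d <= 0:
--         return 0
--     return d * (d + 1) // 2
-- ===== Notes on version B (the rewrite author's own statement) =====
-- stated objective: simpler
-- what changed: Replaces A's nested countdown loops with the closed form (p-n)(p-n+1)/2 (0 when p<=n).
import Mathlib
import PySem

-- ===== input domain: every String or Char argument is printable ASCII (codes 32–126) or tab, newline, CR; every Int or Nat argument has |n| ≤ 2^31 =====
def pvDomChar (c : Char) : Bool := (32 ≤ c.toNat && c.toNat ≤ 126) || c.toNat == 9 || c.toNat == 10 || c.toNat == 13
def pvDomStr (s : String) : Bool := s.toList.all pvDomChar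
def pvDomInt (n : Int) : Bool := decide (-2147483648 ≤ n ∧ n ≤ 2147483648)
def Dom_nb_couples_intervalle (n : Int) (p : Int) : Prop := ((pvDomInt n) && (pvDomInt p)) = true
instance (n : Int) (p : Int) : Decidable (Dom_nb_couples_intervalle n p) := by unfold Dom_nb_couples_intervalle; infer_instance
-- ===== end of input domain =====

-- B replaces A's nested countdown loops with the closed form (p-n)(p-n+1)/2 (0 when p<=n): simpler.


-- ===== PORT A =====
-- inner `while True` loop of A: decrement j, counting, until j = i+1 (then j is reset to p by the caller).
-- The final `else c` branch is a totality guard only: Python reaches the loop solely with j ≥ i+1.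
def pvInnerA (i j c : Int) : Int :=
  if j = i + 1 then c
  else if i + 1 < j then pvInnerA i (j - 1) (c + 1)
  else c
termination_by (j - i - 1).toNat
decreasing_by omega

-- outer `while i < j` loop of A (at each test j has just been reset to p)
def pvOuterA (i p c : Int) : Int :=
  if i < p then pvOuterA (i + 1) p (pvInnerA i p c + 1) else c
termination_by (p - i).toNat
decreasing_by omega

def nb_couples_intervalle (n : Int) (p : Int) : Int := pvOuterA n p 0

-- ===== PORT B =====
def nb_couples_intervalle_alt (n : Int) (p : Int) : Int :=
  let d := p - n
  if d ≤ 0 then 0 else PySem.Int.floordiv (d * (d + 1)) 2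

-- ===== PRECONDITION & SPEC =====
def Spec_nb_couples_intervalle (n : Int) (p : Int) (out : Int) : Prop := out = nb_couples_intervalle_alt n p
instance (n : Int) (p : Int) (out : Int) : Decidable (Spec_nb_couples_intervalle n p out) := by unfold Spec_nb_couples_intervalle; infer_instance

-- ===== CLAIM (what is proved, stated in full; the proofs are below) =====
def Claim_equal_nb_couples_intervalle : Prop := ∀ (n : Int) (p : Int), Dom_nb_couples_intervalle n p → Spec_nb_couples_intervalle n p (nb_couples_intervalle n p)

-- ===== LEMMAS AND PROOFS =====

-- the inner loop called with j = i+1+k adds exactly k to the counter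
theorem pvInnerA_eval (k : Nat) : ∀ (i c : Int), pvInnerA i (i + 1 + (k : Int)) c = c + (k : Int) := by
  induction k with
  | zero => intro i c; unfold pvInnerA; simp
  | succ m ih =>
    intro i c
    unfold pvInnerA
    have h1 : ¬ (i + 1 + ((m + 1 : Nat) : Int) = i + 1) := by push_cast; omega
    have h2 : i + 1 < i + 1 + ((m + 1 : Nat) : Int) := by push_cast; omega
    rw [if_neg h1, if_pos h2]
    have h3 : i + 1 + ((m + 1 : Nat) : Int) - 1 = i + 1 + (m : Int) := by push_cast; omega
    rw [h3, ih]
    push_cast; ring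

theorem pvOuterA_eval (m : Nat) : ∀ (i p c : Int), p - i = (m : Int) →
    pvOuterA i p c = c + (m : Int) * ((m : Int) + 1) / 2 := by
  induction m with
  | zero =>
    intro i p c h
    unfold pvOuterA
    rw [if_neg (by omega)]
    simp
  | succ k ih =>
    intro i p c h
    unfold pvOuterA
    rw [if_pos (by push_cast at h ⊢; omega)]
    have hp : p = i + 1 + (k : Int) := by push_cast at h ⊢; omega
    rw [hp, pvInnerA_eval k i c, ih (i + 1) (i + 1 + (k : Int)) _ (by push_cast; omega)]
    have h2 : ((2:Int)) ∣ (k : Int) * ((k : Int) + 1) := (Int.even_mul_succ_self (k : Int)).two_dvd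
    have h3 : ((2:Int)) ∣ ((k : Int) + 1) * (((k : Int) + 1) + 1) := (Int.even_mul_succ_self ((k : Int) + 1)).two_dvd
    have hr : ((k : Int) + 1) * (((k : Int) + 1) + 1) = (k : Int) * ((k : Int) + 1) + 2 * ((k : Int) + 1) := by ring
    push_cast
    omega

-- ===== VERDICT (by name: the statement is the Claim_ definition above) =====
theorem nb_couples_intervalle_spec : Claim_equal_nb_couples_intervalle := by
  intro n p _
  unfold Spec_nb_couples_intervalle nb_couples_intervalle nb_couples_intervalle_alt
  by_cases h : p - n ≤ 0
  · unfold pvOuterA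
    rw [if_neg (by omega)]
    simp [h]
  · have hm : ∃ m : Nat, p - n = (m : Int) := ⟨(p - n).toNat, by omega⟩
    obtain ⟨m, hm⟩ := hm
    rw [pvOuterA_eval m n p 0 hm]
    simp only [if_neg h, PySem.Int.floordiv]
    rw [hm]
    have h2 : ((2:Int)) ∣ (m : Int) * ((m : Int) + 1) := (Int.even_mul_succ_self (m : Int)).two_dvd
    rw [Int.fdiv_eq_ediv_of_nonneg _ (by positivity)]
    omega
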